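-- pv_equiv track=rewrite | github.com/darkkeks/kks | kks/util/h2t.py | reformat_table
-- ===== SOURCE A (Python) =====
-- from typing import Dict, Optional, List
--
-- def reformat_table(lines: List[str], right_margin: int) -> List[str]:
--     """
--     Given the lines of a table
--     padds the cells and returns the new lines
--     """
--     # find the maximum width of the columns
--     max_width = [len(x.rstrip()) + right_margin for x in lines[0].split("|")]
--     max_cols = len(max_width)
--     for line in lines:
--         cols = [x.rstrip() for x in line.split("|")]
--         num_cols = len(cols)
--
--         # don't drop any data if colspan attributes result in unequal lengths
--         if num_cols < max_cols:
--             cols += [""] * (max_cols - num_cols)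
--         elif max_cols < num_cols:
--             max_width += [len(x) + right_margin for x in cols[-(num_cols - max_cols) :]]
--             max_cols = num_cols
--
--         max_width = [
--             max(len(x) + right_margin, old_len) for x, old_len in zip(cols, max_width)
--         ]
--
-- # ====================modified====================
--     max_width[0] = max_width[-1] = 0  # borders
-- # ====================!modified====================
--
--     # reformat
--     new_lines = []
--     for line in lines:
--         cols = [x.rstrip() for x in line.split("|")]
--         if set(line.strip()) == set("-|"):
--             filler = "-"
--             new_cols = [
--                 x.rstrip() + (filler * (M - len(x.rstrip())))
--                 for x, M in zip(cols, max_width)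
--             ]
--         else:
--             filler = " "
--             new_cols = [
--                 x.rstrip() + (filler * (M - len(x.rstrip())))
--                 for x, M in zip(cols, max_width)
--             ]
--         new_lines.append("|".join(new_cols))
--     return new_lines
-- ===== SOURCE B (Python) =====
-- def reformat_table(lines, right_margin):
--     """
--     Given the lines of a table
--     padds the cells and returns the new lines
--     """
--     # build the full cell matrix, then compute widths column-wise
--     rows = [[c.rstrip() for c in line.split("|")] for line in lines]
--     max_cols = max(len(r) for r in rows)
--     padded = [r + [""] * (max_cols - len(r)) for r in rows]
--     max_width = [max(len(r[j]) + right_margin for r in padded)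
--                  for j in range(max_cols)]
--     max_width[0] = max_width[-1] = 0  # borders
--
--     # reformat
--     result = []
--     for line, cells in zip(lines, rows):
--         filler = "-" if set(line.strip()) == set("-|") else " "
--         result.append("|".join(c + filler * (m - len(c))
--                                for c, m in zip(cells, max_width)))
--     return result
-- ===== Notes on version B (the rewrite author's own statement) =====
-- stated objective: alternative
-- what changed: B builds the full padded cell matrix once and computes each column width as a column-wise maximum over that matrix, replacing A's per-row padding/extension/zip-max rescan of a running width list, and reformats from the precomputed rows via zip(lines, rows) with a single fill expression instead of re-splitting and re-stripping every line.
import Mathlib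
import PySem

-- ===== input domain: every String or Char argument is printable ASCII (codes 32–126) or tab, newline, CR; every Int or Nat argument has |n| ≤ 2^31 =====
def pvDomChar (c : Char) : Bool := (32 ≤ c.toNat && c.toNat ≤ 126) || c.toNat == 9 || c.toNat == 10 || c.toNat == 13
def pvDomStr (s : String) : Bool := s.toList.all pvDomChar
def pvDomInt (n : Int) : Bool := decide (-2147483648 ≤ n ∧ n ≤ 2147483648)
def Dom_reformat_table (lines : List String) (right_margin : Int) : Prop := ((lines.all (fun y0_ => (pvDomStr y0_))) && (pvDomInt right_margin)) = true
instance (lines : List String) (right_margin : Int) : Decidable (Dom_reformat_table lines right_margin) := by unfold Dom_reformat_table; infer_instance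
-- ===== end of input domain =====

-- B builds the whole cell matrix once and computes the column widths column-wise,
-- instead of A's per-row padding/extension of a running width list; return value only.

-- ===== shared primitive wrappers (exact Python built-ins, used by both ports) =====

-- line.split("|"): sep is the non-empty literal "|", so Python never raises; Chars.splitOn is the sep ≠ "" form (exact)
def pvSplitPipe (s : String) : List String :=
  (PySem.Chars.splitOn s.toList ['|']).map String.ofList

-- [x.rstrip() for x in line.split("|")]
def pvCells (line : String) : List String :=
  (pvSplitPipe line).map PySem.Str.rstrip

-- set(line.strip()) == set("-|")
def pvIsSep (line : String) : Bool :=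
  PySem.Set.equal (PySem.Set.ofList (PySem.Str.strip line).toList) (PySem.Set.ofList ['-','|'])

-- c + filler * (M - len(c))  (a negative repeat count gives the empty string, as in Python)
def pvPad (filler : Char) (c : String) (M : Int) : String :=
  String.ofList (c.toList ++ PySem.List.pyRepeat [filler] (M - PySem.Str.len c))

-- max_width[0] = max_width[-1] = 0
def pvSetBorders (w : List Int) : List Int :=
  PySem.List.pySetD (PySem.List.pySetD w 0 0) (-1) 0

-- ===== PORT A =====

-- max(len(x) + right_margin, old_len) zipped
def pvG (rm : Int) : String → Int → Int := fun x ol => max (PySem.Str.len x + rm) ol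

-- initial max_width from lines[0]
def pvW0 (rm : Int) (l0 : String) : List Int :=
  (pvSplitPipe l0).map (fun x => PySem.Str.len (PySem.Str.rstrip x) + rm)

-- one iteration of A's first loop: pad cols / extend max_width, then zip-max
def pvStepA (rm : Int) (w : List Int) (line : String) : List Int :=
  List.zipWith (pvG rm)
    (if (pvCells line).length < w.length then
        pvCells line ++ PySem.List.pyRepeat [""] ((w.length : Int) - ((pvCells line).length : Int))
      else pvCells line)
    (if w.length < (pvCells line).length then
        w ++ (PySem.List.slice (pvCells line)
                (some (-(((pvCells line).length : Int) - (w.length : Int)))) none).map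
              (fun x => PySem.Str.len x + rm)
      else w)

-- A's second (reformat) loop
def pvReformatA (w : List Int) (lines : List String) : List String :=
  lines.foldl (fun acc line =>
    if pvIsSep line then
      acc ++ [PySem.Str.join "|" (List.zipWith (fun x M => pvPad '-' (PySem.Str.rstrip x) M) (pvCells line) w)]
    else
      acc ++ [PySem.Str.join "|" (List.zipWith (fun x M => pvPad ' ' (PySem.Str.rstrip x) M) (pvCells line) w)]) []

def reformat_table (lines : List String) (right_margin : Int) : List String :=
  match lines with
  | [] => []  -- Python raises IndexError on lines[0]; excluded by Pre_
  | l0 :: _ =>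
    pvReformatA (pvSetBorders (lines.foldl (pvStepA right_margin) (pvW0 right_margin l0))) lines

-- ===== PORT B =====

-- max(len(r[j]) + right_margin for r in padded)
def pvColWidth (rm : Int) (padded : List (List String)) (j : Int) : Int :=
  (PySem.List.max? (padded.map (fun r => PySem.Str.len (PySem.List.pyGetD r j "") + rm)) (fun x => x)).getD 0

-- pad every row with "" to max_cols, then the column-wise maxima
def pvWidthsB (rm : Int) (rows : List (List String)) (mc : Int) : List Int :=
  (PySem.List.pyRange 0 mc 1).map
    (pvColWidth rm (rows.map (fun r => r ++ PySem.List.pyRepeat [""] (mc - PySem.List.len r))))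

-- B's reformat loop over zip(lines, rows)
def pvReformatB (w : List Int) (pairs : List (String × List String)) : List String :=
  pairs.foldl (fun acc p =>
    acc ++ [PySem.Str.join "|" (List.zipWith (fun c M => pvPad (if pvIsSep p.1 then '-' else ' ') c M) p.2 w)]) []

-- rows := lines.map pvCells is bound once in Source B; it is written out below to keep the match reducible
def reformat_table_alt (lines : List String) (right_margin : Int) : List String :=
  match PySem.List.max? ((lines.map pvCells).map (fun r => PySem.List.len r)) (fun x => x) with
  | none => []  -- Python: max() of an empty sequence raises ValueError; excluded by Pre_
  | some mc => pvReformatB (pvSetBorders (pvWidthsB right_margin (lines.map pvCells) mc)) (lines.zip (lines.map pvCells))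

-- ===== PRECONDITION & SPEC =====
-- Pre_ excludes only the empty line list, where the Python A raises IndexError on lines[0] (and B raises ValueError).
def Pre_reformat_table (lines : List String) (right_margin : Int) : Prop := lines ≠ []
instance (lines : List String) (right_margin : Int) : Decidable (Pre_reformat_table lines right_margin) := by unfold Pre_reformat_table; infer_instance
def pvWitness_reformat_table : List String × Int := (["a | bb | c", "--|--"], 1)

def Spec_reformat_table (lines : List String) (right_margin : Int) (out : List String) : Prop := out = reformat_table_alt lines right_margin
instance (lines : List String) (right_margin : Int) (out : List String) : Decidable (Spec_reformat_table lines right_margin out) := by unfold Spec_reformat_table; infer_instance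

-- ===== CLAIM (what is proved, stated in full; the proofs are below) =====
def Claim_equal_reformat_table : Prop := ∀ (lines : List String) (right_margin : Int), Dom_reformat_table lines right_margin → Pre_reformat_table lines right_margin → Spec_reformat_table lines right_margin (reformat_table lines right_margin)

-- ===== LEMMAS AND PROOFS =====

-- the width contribution of row r to column j: len(r[j]) + rm, reading "" for a missing cell
def pvF (rm : Int) (r : List String) (j : Nat) : Int := ((r.getD j "").toList.length : Int) + rm

lemma pvF_ge (rm : Int) (r : List String) (j : Nat) : rm ≤ pvF rm r j := by
  unfold pvF; omega

lemma pvF_out (rm : Int) (r : List String) (j : Nat) (h : r.length ≤ j) : pvF rm r j = rm := by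
  unfold pvF
  rw [List.getD_eq_default _ _ h]
  simp

lemma pvStepA_case1 (rm : Int) (w : List Int) (line : String)
    (h1 : (pvCells line).length < w.length) :
    pvStepA rm w line =
      List.zipWith (pvG rm) (pvCells line ++ List.replicate (w.length - (pvCells line).length) "") w := by
  unfold pvStepA
  rw [if_pos h1, if_neg (by omega), PySem.List.pyRepeat_singleton]
  have : (((w.length : Int) - ((pvCells line).length : Int))).toNat = w.length - (pvCells line).length := by omega
  rw [this]

lemma pvStepA_case2 (rm : Int) (w : List Int) (line : String)
    (h2 : w.length < (pvCells line).length) :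
    pvStepA rm w line =
      List.zipWith (pvG rm) (pvCells line)
        (w ++ ((pvCells line).drop w.length).map (fun x => PySem.Str.len x + rm)) := by
  unfold pvStepA
  have hk : (-(((pvCells line).length : Int) - ((w.length : Int)))) = (-(((pvCells line).length - w.length : Nat) : Int)) := by omega
  rw [if_neg (by omega), if_pos h2, hk, PySem.List.slice_from_neg_natCast _ _ (by omega)]
  have : (pvCells line).length - ((pvCells line).length - w.length) = w.length := by omega
  rw [this]

lemma pvStepA_case3 (rm : Int) (w : List Int) (line : String)
    (h3 : (pvCells line).length = w.length) :
    pvStepA rm w line = List.zipWith (pvG rm) (pvCells line) w := by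
  unfold pvStepA
  rw [if_neg (by omega), if_neg (by omega)]

lemma pvStepA_length (rm : Int) (w : List Int) (line : String) :
    (pvStepA rm w line).length = max w.length (pvCells line).length := by
  rcases Nat.lt_trichotomy (pvCells line).length w.length with h | h | h
  · rw [pvStepA_case1 rm w line h]; simp; omega
  · rw [pvStepA_case3 rm w line h]; simp; omega
  · rw [pvStepA_case2 rm w line h]; simp; omega

lemma pvStepA_getElem (rm : Int) (w : List Int) (line : String) (j : Nat)
    (h : j < (pvStepA rm w line).length) :
    (pvStepA rm w line)[j] =
      if j < w.length then max (pvF rm (pvCells line) j) (w.getD j 0)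
      else pvF rm (pvCells line) j := by
  have hlen := pvStepA_length rm w line
  rcases Nat.lt_trichotomy (pvCells line).length w.length with h1 | h1 | h1
  · have hj : j < w.length := by omega
    rw [List.getElem_of_eq (pvStepA_case1 rm w line h1) h, List.getElem_zipWith, if_pos hj]
    unfold pvG
    congr 1
    · rw [List.getElem_append]
      by_cases h3 : j < (pvCells line).length
      · rw [dif_pos h3]
        simp [pvF, List.getD_eq_getElem?_getD, List.getElem?_eq_getElem h3, PySem.Str.len_eq]
      · rw [dif_neg h3]
        simp [pvF, List.getD_eq_getElem?_getD,
          List.getElem?_eq_none (by omega : (pvCells line).length ≤ j), PySem.Str.len_eq]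
    · simp [List.getD_eq_getElem?_getD, List.getElem?_eq_getElem hj]
  · have hj : j < w.length := by omega
    rw [List.getElem_of_eq (pvStepA_case3 rm w line h1) h, List.getElem_zipWith, if_pos hj]
    unfold pvG
    congr 1
    · simp [pvF, List.getD_eq_getElem?_getD, List.getElem?_eq_getElem (by omega : j < (pvCells line).length), PySem.Str.len_eq]
    · simp [List.getD_eq_getElem?_getD, List.getElem?_eq_getElem hj]
  · have hj2 : j < (pvCells line).length := by omega
    rw [List.getElem_of_eq (pvStepA_case2 rm w line h1) h, List.getElem_zipWith]
    have hcj : ((pvCells line).getD j "") = (pvCells line)[j]'hj2 := by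
      simp [List.getD_eq_getElem?_getD, List.getElem?_eq_getElem hj2]
    by_cases h3 : j < w.length
    · rw [if_pos h3, List.getElem_append_left h3]
      unfold pvG pvF
      rw [hcj]
      simp only [PySem.Str.len_eq, List.getD_eq_getElem?_getD, List.getElem?_eq_getElem h3, Option.getD_some]
    · rw [if_neg h3, List.getElem_append_right (by omega), List.getElem_map, List.getElem_drop]
      unfold pvG pvF
      have he : w.length + (j - w.length) = j := by omega
      rw [hcj]
      simp only [PySem.Str.len_eq, he, max_self]

lemma pvStepA_getD (rm : Int) (w : List Int) (line : String) (j : Nat)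
    (h : j < (pvStepA rm w line).length) :
    (pvStepA rm w line).getD j 0 =
      if j < w.length then max (pvF rm (pvCells line) j) (w.getD j 0)
      else pvF rm (pvCells line) j := by
  rw [List.getD_eq_getElem?_getD, List.getElem?_eq_getElem h, Option.getD_some,
    pvStepA_getElem rm w line j h]

-- invariant characterisation of A's first loop
lemma pvFoldA_spec (rm : Int) (rs : List String) : ∀ (w : List Int),
    (∀ j, j < w.length → rm ≤ w.getD j 0) →
    ((rs.foldl (pvStepA rm) w).length = rs.foldl (fun m l => max m (pvCells l).length) w.length ∧
     ∀ j, j < (rs.foldl (pvStepA rm) w).length →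
      (rs.foldl (pvStepA rm) w).getD j 0 =
        (rs.map (fun l => pvF rm (pvCells l) j)).foldl max (if j < w.length then w.getD j 0 else rm)) := by
  induction rs with
  | nil =>
    intro w hw
    refine ⟨rfl, ?_⟩
    intro j hj
    simp only [List.foldl_nil, List.map_nil] at *
    rw [if_pos hj]
  | cons l rs ih =>
    intro w hw
    have hw' : ∀ j, j < (pvStepA rm w l).length → rm ≤ (pvStepA rm w l).getD j 0 := by
      intro j hj
      rw [pvStepA_getD rm w l j hj]
      by_cases h3 : j < w.length
      · rw [if_pos h3]
        exact le_trans (hw j h3) (le_max_right _ _)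
      · rw [if_neg h3]
        exact pvF_ge rm _ j
    obtain ⟨ihlen, ihval⟩ := ih (pvStepA rm w l) hw'
    constructor
    · rw [List.foldl_cons, ihlen, List.foldl_cons, pvStepA_length]
    · intro j hj
      rw [List.foldl_cons, ihval j (by rw [← List.foldl_cons]; exact hj), List.map_cons, List.foldl_cons]
      congr 1
      have hsl := pvStepA_length rm w l
      by_cases h2 : j < (pvStepA rm w l).length
      · rw [if_pos h2, pvStepA_getD rm w l j h2]
        by_cases h3 : j < w.length
        · rw [if_pos h3, if_pos h3, max_comm]
        · rw [if_neg h3, if_neg h3, max_eq_right (pvF_ge rm _ j)]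
      · rw [if_neg h2, if_neg (by omega)]
        rw [pvF_out rm _ j (by omega)]
        simp

lemma pvRstrip_idem (s : String) : PySem.Str.rstrip (PySem.Str.rstrip s) = PySem.Str.rstrip s := by
  unfold PySem.Str.rstrip PySem.Chars.rstrip
  simp [List.dropWhile_idempotent]

-- common form of one reformatted output line
def pvRender (w : List Int) (line : String) : String :=
  PySem.Str.join "|" (List.zipWith (fun c M => pvPad (if pvIsSep line then '-' else ' ') c M) (pvCells line) w)

lemma pvZip_rstrip (f : Char) (sp : List String) (w : List Int) :
    List.zipWith (fun x M => pvPad f (PySem.Str.rstrip x) M) (sp.map PySem.Str.rstrip) w =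
    List.zipWith (fun x M => pvPad f x M) (sp.map PySem.Str.rstrip) w := by
  rw [List.zipWith_map_left, List.zipWith_map_left]
  have : (fun (x : String) (M : Int) => pvPad f (PySem.Str.rstrip (PySem.Str.rstrip x)) M) =
         (fun (x : String) (M : Int) => pvPad f (PySem.Str.rstrip x) M) := by
    funext x M
    rw [pvRstrip_idem]
  rw [this]

lemma pvReformatA_eq (w : List Int) (lines : List String) :
    pvReformatA w lines = lines.map (pvRender w) := by
  unfold pvReformatA
  have hfun : (fun (acc : List String) (line : String) =>
      if pvIsSep line then
        acc ++ [PySem.Str.join "|" (List.zipWith (fun x M => pvPad '-' (PySem.Str.rstrip x) M) (pvCells line) w)]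
      else
        acc ++ [PySem.Str.join "|" (List.zipWith (fun x M => pvPad ' ' (PySem.Str.rstrip x) M) (pvCells line) w)]) =
      (fun (acc : List String) (line : String) => acc ++ [pvRender w line]) := by
    funext acc line
    unfold pvRender pvCells
    by_cases hs : pvIsSep line
    · rw [if_pos hs, if_pos hs, pvZip_rstrip]
    · rw [if_neg hs, if_neg hs, pvZip_rstrip]
  rw [hfun, PySem.List.foldl_append_singleton_eq_map]
  simp

lemma pvReformatB_eq (w : List Int) (lines : List String) :
    pvReformatB w (lines.zip (lines.map pvCells)) = lines.map (pvRender w) := by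
  unfold pvReformatB
  have hz : ∀ (ls : List String), ls.zip (ls.map pvCells) = ls.map (fun l => (l, pvCells l)) := by
    intro ls
    induction ls with
    | nil => rfl
    | cons a t ih => simp [ih]
  rw [hz lines]
  rw [List.foldl_map, PySem.List.foldl_append_singleton_eq_map]
  simp [pvRender]

-- Int-valued running max of column counts equals the Nat-valued one
lemma pvLenFold (ls : List String) : ∀ (a : Nat),
    ((ls.map (fun l => PySem.List.len (pvCells l))).foldl max (a : Int)) =
      ((ls.foldl (fun m l => max m (pvCells l).length) a : Nat) : Int) := by
  induction ls with
  | nil => intro a; simp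
  | cons l ls ih =>
    intro a
    rw [List.map_cons, List.foldl_cons, List.foldl_cons, PySem.List.len_eq, ← Nat.cast_max]
    exact ih _

lemma pvPad_getD (r : List String) (k : Nat) (j : Nat) :
    (r ++ List.replicate k "").getD j "" = r.getD j "" := by
  by_cases h : j < r.length
  · rw [List.getD_eq_getElem?_getD, List.getElem?_append_left h,
      ← List.getD_eq_getElem?_getD]
  · rw [List.getD_eq_getElem?_getD, List.getElem?_append_right (by omega),
      List.getD_eq_default _ _ (by omega)]
    by_cases h2 : j - r.length < k
    · rw [List.getElem?_eq_getElem (by simpa using h2)]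
      simp
    · rw [List.getElem?_eq_none (by simpa using h2)]
      rfl

lemma pvW0_length (rm : Int) (l0 : String) : (pvW0 rm l0).length = (pvCells l0).length := by
  simp [pvW0, pvCells]

lemma pvW0_getD (rm : Int) (l0 : String) (j : Nat) (h : j < (pvCells l0).length) :
    (pvW0 rm l0).getD j 0 = pvF rm (pvCells l0) j := by
  have hj : j < (pvSplitPipe l0).length := by
    simpa [pvCells] using h
  unfold pvW0 pvF pvCells
  rw [List.getD_eq_getElem?_getD, List.getElem?_map, List.getElem?_eq_getElem hj,
    List.getD_eq_getElem?_getD, List.getElem?_map, List.getElem?_eq_getElem hj]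
  simp [PySem.Str.len_eq]

lemma pvGetD_of_lt (l : List Int) (j : Nat) (h : j < l.length) : l.getD j 0 = l[j] := by
  simp [List.getD_eq_getElem?_getD, List.getElem?_eq_getElem h]

-- A's final width list equals B's, elementwise and in length
lemma pvWidths_eq (rm : Int) (l0 : String) (rest : List String) :
    (l0 :: rest).foldl (pvStepA rm) (pvW0 rm l0) =
      pvWidthsB rm ((l0 :: rest).map pvCells)
        ((((l0 :: rest).map pvCells).map (fun r => PySem.List.len r)).foldl max
          (PySem.List.len (pvCells l0))) := by
  have hmc : (((l0 :: rest).map pvCells).map (fun r => PySem.List.len r)).foldl max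
      (PySem.List.len (pvCells l0)) =
      (((l0 :: rest).foldl (fun m l => max m (pvCells l).length) (pvCells l0).length : Nat) : Int) := by
    rw [List.map_map]
    have h0 : PySem.List.len (pvCells l0) = (((pvCells l0).length : Nat) : Int) := PySem.List.len_eq _
    rw [h0]
    have := pvLenFold (l0 :: rest) ((pvCells l0).length)
    simpa [Function.comp] using this
  have hinv : ∀ j, j < (pvW0 rm l0).length → rm ≤ (pvW0 rm l0).getD j 0 := by
    intro j hj
    rw [pvW0_getD rm l0 j (by rwa [pvW0_length] at hj)]
    exact pvF_ge rm _ j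
  obtain ⟨hlen, hval⟩ := pvFoldA_spec rm (l0 :: rest) (pvW0 rm l0) hinv
  have hlenA : ((l0 :: rest).foldl (pvStepA rm) (pvW0 rm l0)).length =
      (l0 :: rest).foldl (fun m l => max m (pvCells l).length) (pvCells l0).length := by
    rw [hlen, pvW0_length]
  have hlenB : (pvWidthsB rm ((l0 :: rest).map pvCells)
      ((((l0 :: rest).map pvCells).map (fun r => PySem.List.len r)).foldl max
        (PySem.List.len (pvCells l0)))).length =
      (l0 :: rest).foldl (fun m l => max m (pvCells l).length) (pvCells l0).length := by
    unfold pvWidthsB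
    rw [List.length_map, hmc, PySem.List.length_pyRange_one]
    omega
  apply List.ext_getElem (by omega)
  intro j h1 h2
  -- A side value
  have hjA : j < ((l0 :: rest).foldl (pvStepA rm) (pvW0 rm l0)).length := h1
  rw [← pvGetD_of_lt _ j hjA, hval j hjA]
  rw [List.map_cons, List.foldl_cons]
  have hbase : (max (if j < (pvW0 rm l0).length then (pvW0 rm l0).getD j 0 else rm)
      (pvF rm (pvCells l0) j)) = pvF rm (pvCells l0) j := by
    by_cases hj0 : j < (pvW0 rm l0).length
    · rw [if_pos hj0, pvW0_getD rm l0 j (by rwa [pvW0_length] at hj0), max_self]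
    · rw [if_neg hj0]
      exact max_eq_right (pvF_ge rm _ j)
  rw [hbase]
  -- B side value
  unfold pvWidthsB pvColWidth
  rw [List.getElem_map, PySem.List.getElem_pyRange_one]
  have hfn : (fun (r : List String) =>
        PySem.Str.len (PySem.List.pyGetD (r ++ PySem.List.pyRepeat [""]
          ((((l0 :: rest).map pvCells).map (fun r => PySem.List.len r)).foldl max
            (PySem.List.len (pvCells l0)) - PySem.List.len r)) ((0 : Int) + (j : Int)) "") + rm) =
      (fun (r : List String) => pvF rm r j) := by
    funext r
    rw [PySem.List.pyRepeat_singleton]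
    have : ((0 : Int) + (j : Int)) = ((j : Nat) : Int) := by omega
    rw [this, PySem.List.pyGetD_natCast, pvPad_getD, PySem.Str.len_eq]
    rfl
  rw [List.map_map]
  have hshape : ((l0 :: rest).map pvCells).map (fun (r : List String) =>
        PySem.Str.len (PySem.List.pyGetD (r ++ PySem.List.pyRepeat [""]
          ((((l0 :: rest).map pvCells).map (fun r => PySem.List.len r)).foldl max
            (PySem.List.len (pvCells l0)) - PySem.List.len r)) ((0 : Int) + (j : Int)) "") + rm) =
      pvF rm (pvCells l0) j :: (rest.map pvCells).map (fun r => pvF rm r j) := by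
    rw [hfn]
    simp
  simp only [Function.comp_def]
  rw [hshape, PySem.List.max?_id_cons, Option.getD_some]
  simp [List.map_map, Function.comp_def]

theorem reformat_table_spec : Claim_equal_reformat_table := by
  intro lines rm hdom hpre
  unfold Spec_reformat_table
  match lines with
  | [] => exact absurd rfl hpre
  | l0 :: rest =>
    show reformat_table (l0 :: rest) rm = reformat_table_alt (l0 :: rest) rm
    unfold reformat_table reformat_table_alt
    rw [show ((l0 :: rest).map pvCells).map (fun r => PySem.List.len r) =
        PySem.List.len (pvCells l0) :: (rest.map pvCells).map (fun r => PySem.List.len r) by simp]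
    rw [PySem.List.max?_id_cons]
    simp only []
    rw [pvReformatA_eq, pvReformatB_eq]
    congr 2
    rw [pvWidths_eq]
    congr 1
    simp
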